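-- pv_equiv track=rewrite | github.com/brisacoder/mlops | external/concept_gate.py | _has_proximity
-- ===== SOURCE A (Python) =====
-- from typing import Any, Dict, Iterable, List, Optional, Sequence, Set, Tuple
--
-- def _has_proximity(
--     head_pos: List[int],
--     mod_pos: List[int],
--     window: int,
-- ) -> bool:
--     """Return True if any head position is within `window` of any modifier pos."""
--     if not head_pos or not mod_pos:
--         return False
--     i, j = 0, 0
--     head_pos = sorted(head_pos)
--     mod_pos = sorted(mod_pos)
--     while i < len(head_pos) and j < len(mod_pos):
--         if abs(head_pos[i] - mod_pos[j]) <= window: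
--             return True
--         if head_pos[i] < mod_pos[j]:
--             i += 1
--         else:
--             j += 1
--     return False
-- ===== SOURCE B (Python) =====
-- def _has_proximity(head_pos, mod_pos, window):
--     """Return True if any head position is within `window` of any modifier pos."""
--     return any(abs(h - m) <= window for h in head_pos for m in mod_pos)
-- ===== Notes on version B (the rewrite author's own statement) =====
-- stated objective: simpler
-- what changed: Replaces the sort-both-lists-then-two-pointer merge scan with a direct nested any() over all head/modifier pairs (no sorting, no index bookkeeping), proved equal via the shared characterisation 'some pair lies within window'.
import Mathlib
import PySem

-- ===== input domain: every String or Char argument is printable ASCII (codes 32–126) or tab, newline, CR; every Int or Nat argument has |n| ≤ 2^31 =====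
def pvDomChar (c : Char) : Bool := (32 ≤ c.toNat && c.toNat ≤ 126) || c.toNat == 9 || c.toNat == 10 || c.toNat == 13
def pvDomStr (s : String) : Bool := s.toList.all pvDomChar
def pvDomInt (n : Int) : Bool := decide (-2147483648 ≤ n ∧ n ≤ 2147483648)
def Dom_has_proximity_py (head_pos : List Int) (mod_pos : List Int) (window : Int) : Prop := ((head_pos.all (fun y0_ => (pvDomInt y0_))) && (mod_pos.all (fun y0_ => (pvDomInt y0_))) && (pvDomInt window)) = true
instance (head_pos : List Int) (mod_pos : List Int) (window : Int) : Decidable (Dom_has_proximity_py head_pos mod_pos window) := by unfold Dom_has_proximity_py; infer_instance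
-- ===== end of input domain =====

-- B replaces A's sort-both-lists-then-two-pointer merge scan by a direct nested any() over all pairs (simpler; no sorting).
-- Neither version mutates the caller's lists (A rebinds its parameters to sorted copies).

-- ===== PORT A =====
-- the Python while-loop over indices i, j (both lists already sorted)
def hasProxLoop (hs ms : List Int) (w : Int) (i j : Nat) : Bool :=
  if hij : i < hs.length ∧ j < ms.length then
    if |hs.getD i 0 - ms.getD j 0| ≤ w then true
    else if hs.getD i 0 < ms.getD j 0 then hasProxLoop hs ms w (i + 1) j
    else hasProxLoop hs ms w i (j + 1)
  else false
termination_by hs.length + ms.length - (i + j)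
decreasing_by all_goals omega

def has_proximity_py (head_pos : List Int) (mod_pos : List Int) (window : Int) : Bool :=
  if head_pos = [] ∨ mod_pos = [] then false
  else hasProxLoop (PySem.List.sorted head_pos (fun x => x)) (PySem.List.sorted mod_pos (fun x => x)) window 0 0

-- ===== PORT B =====
def has_proximity_py_alt (head_pos : List Int) (mod_pos : List Int) (window : Int) : Bool :=
  head_pos.any (fun h => mod_pos.any (fun m => decide (|h - m| ≤ window)))

-- ===== PRECONDITION & SPEC =====
def Spec_has_proximity_py (head_pos : List Int) (mod_pos : List Int) (window : Int) (out : Bool) : Prop := out = has_proximity_py_alt head_pos mod_pos window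
instance (head_pos : List Int) (mod_pos : List Int) (window : Int) (out : Bool) : Decidable (Spec_has_proximity_py head_pos mod_pos window out) := by unfold Spec_has_proximity_py; infer_instance

-- ===== CLAIM (what is proved, stated in full; the proofs are below) =====
def Claim_equal_has_proximity_py : Prop := ∀ (head_pos : List Int) (mod_pos : List Int) (window : Int), Dom_has_proximity_py head_pos mod_pos window → Spec_has_proximity_py head_pos mod_pos window (has_proximity_py head_pos mod_pos window)

-- ===== LEMMAS AND PROOFS =====

-- the two-pointer scan over sorted lists returns true iff some pair within `w` exists among the remaining suffixes
theorem hasProxLoop_true_iff (hs ms : List Int) (w : Int)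
    (hhs : hs.Pairwise (· ≤ ·)) (hms : ms.Pairwise (· ≤ ·)) (i j : Nat) :
    hasProxLoop hs ms w i j = true ↔ ∃ x ∈ hs.drop i, ∃ y ∈ ms.drop j, |x - y| ≤ w := by
  induction i, j using hasProxLoop.induct hs ms w with
  | case1 i j hij hle =>
    obtain ⟨hi, hj⟩ := hij
    have ha : hs.getD i 0 = hs[i] := List.getD_eq_getElem _ _ hi
    have hb : ms.getD j 0 = ms[j] := List.getD_eq_getElem _ _ hj
    rw [hasProxLoop]
    simp only [dif_pos (And.intro hi hj), if_pos hle, true_iff]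
    exact ⟨hs[i], by rw [List.drop_eq_getElem_cons hi]; exact List.mem_cons_self,
           ms[j], by rw [List.drop_eq_getElem_cons hj]; exact List.mem_cons_self,
           by rwa [ha, hb] at hle⟩
  | case2 i j hij hle hlt ih =>
    obtain ⟨hi, hj⟩ := hij
    have ha : hs.getD i 0 = hs[i] := List.getD_eq_getElem _ _ hi
    have hb : ms.getD j 0 = ms[j] := List.getD_eq_getElem _ _ hj
    rw [hasProxLoop]
    simp only [dif_pos (And.intro hi hj), if_neg hle, if_pos hlt]
    rw [ih]
    constructor
    · rintro ⟨x, hx, y, hy, hxy⟩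
      exact ⟨x, by rw [List.drop_eq_getElem_cons hi]; exact List.mem_cons_of_mem _ hx, y, hy, hxy⟩
    · rintro ⟨x, hx, y, hy, hxy⟩
      rw [List.drop_eq_getElem_cons hi] at hx
      rcases List.mem_cons.mp hx with hxeq | hx
      · exfalso
        -- x = hs[i]; every remaining modifier y is ≥ ms[j], so |x - y| > w
        have hby : ms[j] ≤ y := by
          have hp := hms.drop (i := j)
          rw [List.drop_eq_getElem_cons hj] at hp
          rcases List.pairwise_cons.mp hp with ⟨hall, _⟩
          rw [List.drop_eq_getElem_cons hj] at hy
          rcases List.mem_cons.mp hy with hyeq | hy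
          · exact le_of_eq hyeq.symm
          · exact hall y hy
        rw [ha, hb] at hle hlt
        subst hxeq
        have h1 := abs_le.mp hxy
        have h2 : ¬(-w ≤ hs[i] - ms[j] ∧ hs[i] - ms[j] ≤ w) := fun hc => hle (abs_le.mpr hc)
        omega
      · exact ⟨x, hx, y, hy, hxy⟩
  | case3 i j hij hle hlt ih =>
    obtain ⟨hi, hj⟩ := hij
    have ha : hs.getD i 0 = hs[i] := List.getD_eq_getElem _ _ hi
    have hb : ms.getD j 0 = ms[j] := List.getD_eq_getElem _ _ hj
    rw [hasProxLoop]
    simp only [dif_pos (And.intro hi hj), if_neg hle, if_neg hlt]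
    rw [ih]
    constructor
    · rintro ⟨x, hx, y, hy, hxy⟩
      exact ⟨x, hx, y, by rw [List.drop_eq_getElem_cons hj]; exact List.mem_cons_of_mem _ hy, hxy⟩
    · rintro ⟨x, hx, y, hy, hxy⟩
      rw [List.drop_eq_getElem_cons hj] at hy
      rcases List.mem_cons.mp hy with hyeq | hy
      · exfalso
        -- y = ms[j]; every remaining head x is ≥ hs[i] ≥ ms[j], so |x - y| > w
        have hbx : hs[i] ≤ x := by
          have hp := hhs.drop (i := i)
          rw [List.drop_eq_getElem_cons hi] at hp
          rcases List.pairwise_cons.mp hp with ⟨hall, _⟩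
          rw [List.drop_eq_getElem_cons hi] at hx
          rcases List.mem_cons.mp hx with hxeq | hx
          · exact le_of_eq hxeq.symm
          · exact hall x hx
        rw [ha, hb] at hle hlt
        subst hyeq
        have h1 := abs_le.mp hxy
        have h2 : ¬(-w ≤ hs[i] - ms[j] ∧ hs[i] - ms[j] ≤ w) := fun hc => hle (abs_le.mpr hc)
        omega
      · exact ⟨x, hx, y, hy, hxy⟩
  | case4 i j hij =>
    rw [hasProxLoop]
    simp only [dif_neg hij]
    refine ⟨fun h => absurd h (by simp), ?_⟩
    rintro ⟨x, hx, y, hy, _⟩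
    rcases not_and_or.mp hij with h | h
    · rw [List.drop_eq_nil_of_le (by omega)] at hx; exact absurd hx List.not_mem_nil
    · rw [List.drop_eq_nil_of_le (by omega)] at hy; exact absurd hy List.not_mem_nil

-- ===== VERDICT (by name: the statement is the Claim_ definition above) =====
theorem has_proximity_py_spec : Claim_equal_has_proximity_py := by
  unfold Claim_equal_has_proximity_py
  intro head_pos mod_pos window _
  unfold Spec_has_proximity_py has_proximity_py has_proximity_py_alt
  by_cases hh : head_pos = [] ∨ mod_pos = []
  · rw [if_pos hh]
    rcases hh with h | h <;> subst h <;> simp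
  · rw [if_neg hh]
    have hp1 : (PySem.List.sorted head_pos (fun x => x)).Pairwise (· ≤ ·) :=
      PySem.List.sorted_pairwise head_pos (fun x => x)
    have hp2 : (PySem.List.sorted mod_pos (fun x => x)).Pairwise (· ≤ ·) :=
      PySem.List.sorted_pairwise mod_pos (fun x => x)
    rw [Bool.eq_iff_iff, hasProxLoop_true_iff _ _ window hp1 hp2 0 0]
    simp [List.any_eq_true, PySem.List.mem_sorted]
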